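-- pv_equiv track=rewrite | github.com/Rhos0129/AlgorithmStudy | 백준 분류별 (+ 이것이 코딩테스트다 with Python)/01. 그리디 알고리즘/2864. 5와 6의 차이.py | lowhigh
-- ===== SOURCE A (Python) =====
-- def lowhigh(num):
--     lowNum=0; highNum=0
--     for idx, i in enumerate(num):
--         place = len(num) - idx - 1
--         if i=='5' or i=='6':
--             lowNum+=5*(10**place)
--             highNum+=6*(10**place)
--         else:
--             lowNum+=int(i)*(10**place)
--             highNum+=int(i)*(10**place)
--     return lowNum, highNum
-- ===== SOURCE B (Python) =====
-- def lowhigh(num):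
--     lo = 0
--     hi = 0
--     for c in num:
--         d = int(c)
--         lo = 10 * lo + (5 if d == 6 else d)
--         hi = 10 * hi + (6 if d == 5 else d)
--     return lo, hi
-- ===== Notes on version B (the rewrite author's own statement) =====
-- stated objective: simpler
-- what changed: Replaces the enumerate/len positional accumulation with per-place powers 10**(len-idx-1) by a single Horner-scheme pass (acc = 10*acc + digit) over the characters, removing enumerate, the place computation and all exponentiations.
import Mathlib
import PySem

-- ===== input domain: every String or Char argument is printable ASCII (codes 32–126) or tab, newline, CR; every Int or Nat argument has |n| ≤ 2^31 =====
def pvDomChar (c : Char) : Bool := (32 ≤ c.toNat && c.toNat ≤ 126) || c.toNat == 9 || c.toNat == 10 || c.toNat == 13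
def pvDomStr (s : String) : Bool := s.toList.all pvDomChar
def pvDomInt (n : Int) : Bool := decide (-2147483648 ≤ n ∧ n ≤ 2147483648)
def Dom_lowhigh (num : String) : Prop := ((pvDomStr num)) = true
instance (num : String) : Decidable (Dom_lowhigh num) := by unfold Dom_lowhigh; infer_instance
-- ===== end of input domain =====

-- B replaces A's enumerate/len positional accumulation (per-place powers 10**(len-idx-1))
-- by a single Horner-scheme pass (acc = 10*acc + digit); objective: simpler.


-- ===== PORT A =====
-- One step of A's loop over enumerate(num): place = len(num)-idx-1 (inside the loop idx < len,
-- so place ≥ 0 and `.toNat` is exact); int(i) is PySem.Int.ofChars? [i] (none = ValueError),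
-- threaded through an Option state; Pre_ excludes the raising inputs.
def lowhighStepA (L : Nat) (acc : Option (Int × Int)) (p : Int × Char) : Option (Int × Int) :=
  match acc with
  | none => none
  | some (lowNum, highNum) =>
    let place : Int := (L : Int) - p.1 - 1
    if p.2 = '5' ∨ p.2 = '6' then
      some (lowNum + 5 * 10 ^ place.toNat, highNum + 6 * 10 ^ place.toNat)
    else
      match PySem.Int.ofChars? [p.2] with
      | some v => some (lowNum + v * 10 ^ place.toNat, highNum + v * 10 ^ place.toNat)
      | none => none

def lowhigh (num : String) : Int × Int :=
  ((PySem.List.enumerate num.toList 0).foldl (lowhighStepA num.toList.length) (some (0, 0))).getD (0, 0)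

-- ===== PORT B =====
-- One step of B's loop: d = int(c); lo = 10*lo + (5 if d == 6 else d); hi = 10*hi + (6 if d == 5 else d)
def lowhighStepB (acc : Option (Int × Int)) (c : Char) : Option (Int × Int) :=
  match acc with
  | none => none
  | some (lo, hi) =>
    match PySem.Int.ofChars? [c] with
    | some d => some (10 * lo + (if d = 6 then 5 else d), 10 * hi + (if d = 5 then 6 else d))
    | none => none

def lowhigh_alt (num : String) : Int × Int :=
  (num.toList.foldl lowhighStepB (some (0, 0))).getD (0, 0)

-- ===== PRECONDITION & SPEC =====
-- Exactly the inputs on which A returns: every character an ASCII digit (on any other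
-- character int(i) raises ValueError); the empty string is admitted, A returns (0, 0) there.
def Pre_lowhigh (num : String) : Prop := num.toList.all Char.isDigit = true
instance (num : String) : Decidable (Pre_lowhigh num) := by unfold Pre_lowhigh; infer_instance

def pvWitness_lowhigh : String := "90516263"

def Spec_lowhigh (num : String) (out : Int × Int) : Prop := out = lowhigh_alt num
instance (num : String) (out : Int × Int) : Decidable (Spec_lowhigh num out) := by unfold Spec_lowhigh; infer_instance

-- ===== CLAIM (what is proved, stated in full; the proofs are below) =====
def Claim_equal_lowhigh : Prop := ∀ (num : String), Dom_lowhigh num → Pre_lowhigh num → Spec_lowhigh num (lowhigh num)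

-- ===== LEMMAS AND PROOFS =====

-- the digit substitutions both programs perform, as a function of one character
def pvLow (c : Char) : Int := if c = '6' then 5 else (c.toNat : Int) - 48
def pvHigh (c : Char) : Int := if c = '5' then 6 else (c.toNat : Int) - 48

-- positional value Σ_j f(c_j) * 10^(len-1-j)
def pvPos (f : Char → Int) : List Char → Int
  | [] => 0
  | c :: cs => f c * 10 ^ cs.length + pvPos f cs

theorem pv_char_of_toNat (c d : Char) (h : c.toNat = d.toNat) : c = d :=
  Char.ext (UInt32.toNat_inj.mp (by simpa using h))

theorem pv_digit_cases (c : Char) (h : c.isDigit = true) :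
    c = '0' ∨ c = '1' ∨ c = '2' ∨ c = '3' ∨ c = '4' ∨ c = '5' ∨ c = '6' ∨ c = '7' ∨ c = '8' ∨ c = '9' := by
  have hb : 48 ≤ c.toNat ∧ c.toNat ≤ 57 := by
    simpa [Char.isDigit, UInt32.le_iff_toNat_le] using h
  have h10 : c.toNat = 48 ∨ c.toNat = 49 ∨ c.toNat = 50 ∨ c.toNat = 51 ∨ c.toNat = 52 ∨
      c.toNat = 53 ∨ c.toNat = 54 ∨ c.toNat = 55 ∨ c.toNat = 56 ∨ c.toNat = 57 := by omega
  rcases h10 with h'|h'|h'|h'|h'|h'|h'|h'|h'|h'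
  · exact Or.inl (pv_char_of_toNat c '0' (h'.trans (by decide)))
  · exact Or.inr (Or.inl (pv_char_of_toNat c '1' (h'.trans (by decide))))
  · exact Or.inr (Or.inr (Or.inl (pv_char_of_toNat c '2' (h'.trans (by decide)))))
  · exact Or.inr (Or.inr (Or.inr (Or.inl (pv_char_of_toNat c '3' (h'.trans (by decide))))))
  · exact Or.inr (Or.inr (Or.inr (Or.inr (Or.inl (pv_char_of_toNat c '4' (h'.trans (by decide)))))))
  · exact Or.inr (Or.inr (Or.inr (Or.inr (Or.inr (Or.inl (pv_char_of_toNat c '5' (h'.trans (by decide))))))))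
  · exact Or.inr (Or.inr (Or.inr (Or.inr (Or.inr (Or.inr (Or.inl (pv_char_of_toNat c '6' (h'.trans (by decide)))))))))
  · exact Or.inr (Or.inr (Or.inr (Or.inr (Or.inr (Or.inr (Or.inr (Or.inl (pv_char_of_toNat c '7' (h'.trans (by decide))))))))))
  · exact Or.inr (Or.inr (Or.inr (Or.inr (Or.inr (Or.inr (Or.inr (Or.inr (Or.inl (pv_char_of_toNat c '8' (h'.trans (by decide)))))))))))
  · exact Or.inr (Or.inr (Or.inr (Or.inr (Or.inr (Or.inr (Or.inr (Or.inr (Or.inr (pv_char_of_toNat c '9' (h'.trans (by decide)))))))))))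

theorem pv_ofChars_digit (c : Char) (h : c.isDigit = true) :
    PySem.Int.ofChars? [c] = some ((c.toNat : Int) - 48) := by
  rcases pv_digit_cases c h with h|h|h|h|h|h|h|h|h|h <;> subst h <;> decide

theorem pv_stepA (L : Nat) (lo hi : Int) (k : Int) (c : Char) (n : Nat) (hc : c.isDigit = true)
    (hplace : ((L : Int) - k - 1).toNat = n) :
    lowhighStepA L (some (lo, hi)) (k, c)
      = some (lo + pvLow c * 10 ^ n, hi + pvHigh c * 10 ^ n) := by
  by_cases h56 : c = '5' ∨ c = '6'
  · rcases h56 with h|h <;> subst h <;> simp [lowhighStepA, hplace, pvLow, pvHigh]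
  · rw [not_or] at h56
    simp [lowhighStepA, h56.1, h56.2, pv_ofChars_digit c hc, hplace, pvLow, pvHigh]

theorem pv_foldA (cs : List Char) (L k : Nat) (lo hi : Int)
    (hd : ∀ c ∈ cs, c.isDigit = true) (hk : k + cs.length = L) :
    (PySem.List.enumerate cs (k : Int)).foldl (lowhighStepA L) (some (lo, hi))
      = some (lo + pvPos pvLow cs, hi + pvPos pvHigh cs) := by
  induction cs generalizing k lo hi with
  | nil => simp [PySem.List.enumerate_nil, pvPos]
  | cons c cs ih =>
    have hc : c.isDigit = true := hd c (List.mem_cons_self ..)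
    have hplace : ((L : Int) - (k : Int) - 1).toNat = cs.length := by
      simp at hk ⊢; omega
    rw [PySem.List.enumerate_cons, List.foldl_cons,
        pv_stepA L lo hi (k : Int) c cs.length hc hplace,
        show ((k : Int) + 1) = ((k + 1 : Nat) : Int) by push_cast; ring,
        ih (k + 1) _ _ (fun c hc => hd c (List.mem_cons_of_mem _ hc)) (by simp at hk ⊢; omega)]
    simp [pvPos]; constructor <;> ring

theorem pv_stepB (lo hi : Int) (c : Char) (hc : c.isDigit = true) :
    lowhighStepB (some (lo, hi)) c = some (10 * lo + pvLow c, 10 * hi + pvHigh c) := by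
  simp only [lowhighStepB, pv_ofChars_digit c hc]
  rcases pv_digit_cases c hc with h|h|h|h|h|h|h|h|h|h <;> subst h <;>
    (norm_num [pvLow, pvHigh]; all_goals decide)

theorem pv_foldB (cs : List Char) (lo hi : Int) (hd : ∀ c ∈ cs, c.isDigit = true) :
    cs.foldl lowhighStepB (some (lo, hi))
      = some (lo * 10 ^ cs.length + pvPos pvLow cs, hi * 10 ^ cs.length + pvPos pvHigh cs) := by
  induction cs generalizing lo hi with
  | nil => simp [pvPos]
  | cons c cs ih =>
    rw [List.foldl_cons, pv_stepB lo hi c (hd c (List.mem_cons_self ..)),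
        ih _ _ (fun c hc => hd c (List.mem_cons_of_mem _ hc))]
    simp [pvPos]; constructor <;> ring

-- ===== VERDICT (by name: the statement is the Claim_ definition above) =====
theorem lowhigh_spec : Claim_equal_lowhigh := by
  intro num _ hpre
  unfold Spec_lowhigh lowhigh lowhigh_alt
  have hd : ∀ c ∈ num.toList, c.isDigit = true := by
    simpa [Pre_lowhigh, List.all_eq_true] using hpre
  have hA := pv_foldA num.toList num.toList.length 0 0 0 hd (by omega)
  have hB := pv_foldB num.toList 0 0 hd
  simp only [Nat.cast_zero] at hA
  rw [hA, hB]
  simp
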